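-- pv_equiv track=rewrite | github.com/pydantic/pydantic-ai | pydantic_ai_slim/pydantic_ai/environments/docker.py | _globstar_zero_dir_variants
-- ===== SOURCE A (Python) =====
-- def _globstar_zero_dir_variants(pattern: str) -> list[str]:
--     """Generate variants of *pattern* with one or more ``**/`` segments collapsed.
--
--     In ``find -path``, the literal ``/`` inside ``**/`` requires at least one
--     directory level, so ``**`` never matches zero directories.  This helper
--     produces all the collapsed forms needed to cover the zero-directory case.
--
--     Examples::
--
--         '**/*.py'          → ['*.py']
--         'src/**/*.py'      → ['src/*.py']
--         '**/src/**/*.py'   → ['**/src/*.py', 'src/**/*.py', 'src/*.py']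
--     """
--     segments = pattern.split('**/')
--     if len(segments) <= 1:
--         return []
--     n = len(segments) - 1  # number of **/ occurrences
--     all_kept = (1 << n) - 1
--     variants: set[str] = set()
--     for mask in range(all_kept):  # every subset except "all kept" (= original)
--         result = segments[0]
--         for i in range(n):
--             if mask & (1 << i):
--                 result += '**/' + segments[i + 1]
--             else:
--                 result += segments[i + 1]
--         variants.add(result)
--     return sorted(variants)
-- ===== SOURCE B (Python) =====
-- def _globstar_zero_dir_variants(pattern: str) -> list[str]:
--     """Recursive decision-tree enumeration: at each '**/' occurrence either keep
--     it or collapse it, collecting only strings where at least one was collapsed."""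
--     segments = pattern.split('**/')
--     if len(segments) <= 1:
--         return []
--
--     def walk(rest, prefix, dropped):
--         if not rest:
--             return [prefix] if dropped else []
--         head, tail = rest[0], rest[1:]
--         return walk(tail, prefix + '**/' + head, dropped) + walk(tail, prefix + head, True)
--
--     return sorted(set(walk(segments[1:], segments[0], False)))
-- ===== Notes on version B (the rewrite author's own statement) =====
-- stated objective: alternative
-- what changed: Replaces the bitmask double loop (for each mask below 2^n-1, rebuild the string bit by bit) with a recursive decision tree over the split segments that branches keep/collapse at each globstar occurrence and keeps only strings where at least one collapse happened, so the all-kept original is never generated instead of being skipped by mask arithmetic.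
import Mathlib
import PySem

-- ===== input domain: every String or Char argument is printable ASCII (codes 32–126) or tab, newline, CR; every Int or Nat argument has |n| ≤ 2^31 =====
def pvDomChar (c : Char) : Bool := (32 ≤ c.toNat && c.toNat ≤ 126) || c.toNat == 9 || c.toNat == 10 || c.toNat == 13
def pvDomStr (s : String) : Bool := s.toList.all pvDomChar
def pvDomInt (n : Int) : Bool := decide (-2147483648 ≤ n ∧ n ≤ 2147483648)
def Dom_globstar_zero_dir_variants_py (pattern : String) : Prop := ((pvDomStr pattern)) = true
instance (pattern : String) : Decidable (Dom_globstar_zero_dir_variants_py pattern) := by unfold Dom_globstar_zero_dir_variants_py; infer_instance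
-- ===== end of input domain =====

-- B replaces A's bitmask double loop by a recursive keep/collapse decision tree over the
-- segments that only collects strings with at least one collapse (objective: alternative).

-- ===== PORT A =====
-- body after the split, as a helper; n = segments.length - 1 and all_kept = (1 <<< n) - 1 are
-- written inline; mask and all_kept are nonnegative Python ints (range/bitmask), so Nat is exact
def gzACore (segments : List String) : List String :=
  if segments.length ≤ 1 then []
  else
    PySem.List.sorted
      ((List.range ((1 <<< (segments.length - 1)) - 1)).foldl (fun v mask =>
        PySem.Set.add v ((List.range (segments.length - 1)).foldl (fun r i =>
          if mask &&& (1 <<< i) != 0 then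
            r ++ "**/" ++ PySem.List.pyGetD segments ((i : Int) + 1) ""
          else
            r ++ PySem.List.pyGetD segments ((i : Int) + 1) "")
          (PySem.List.pyGetD segments 0 ""))) PySem.Set.empty)
      (fun x => x) false

-- pattern.split('**/'): the separator is nonempty, so split? is always `some`; getD is exact
def globstar_zero_dir_variants_py (pattern : String) : List String :=
  gzACore ((PySem.Str.split? pattern "**/").getD [])

-- ===== PORT B =====
-- helper walk(rest, prefix, dropped) of Source B, step for step
def gzWalk : List String → String → Bool → List String
  | [], pre, dropped => if dropped then [pre] else []
  | s :: tail, pre, dropped =>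
      gzWalk tail (pre ++ "**/" ++ s) dropped ++ gzWalk tail (pre ++ s) true

-- segments[1:] is segments.drop 1; segments[0] via pyGetD (the list is nonempty here)
def gzBCore (segments : List String) : List String :=
  if segments.length ≤ 1 then []
  else
    PySem.List.sorted
      (PySem.Set.ofList (gzWalk (segments.drop 1) (PySem.List.pyGetD segments 0 "") false))
      (fun x => x) false

def globstar_zero_dir_variants_py_alt (pattern : String) : List String :=
  gzBCore ((PySem.Str.split? pattern "**/").getD [])

-- ===== PRECONDITION & SPEC =====
def Spec_globstar_zero_dir_variants_py (pattern : String) (out : List String) : Prop := out = globstar_zero_dir_variants_py_alt pattern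
instance (pattern : String) (out : List String) : Decidable (Spec_globstar_zero_dir_variants_py pattern out) := by unfold Spec_globstar_zero_dir_variants_py; infer_instance

-- ===== CLAIM (what is proved, stated in full; the proofs are below) =====
def Claim_equal_globstar_zero_dir_variants_py : Prop := ∀ (pattern : String), Dom_globstar_zero_dir_variants_py pattern → Spec_globstar_zero_dir_variants_py pattern (globstar_zero_dir_variants_py pattern)

-- ===== LEMMAS AND PROOFS =====

-- the string built from a prefix, the remaining segments and one keep/collapse bit per segment
def gzBuild : String → List String → List Bool → String
  | p, s :: ss, b :: bs => gzBuild (if b then p ++ "**/" ++ s else p ++ s) ss bs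
  | p, _, _ => p

-- the little-endian value of a bit list
def gzOfBits : List Bool → Nat
  | [] => 0
  | b :: bs => (cond b 1 0) + 2 * gzOfBits bs

theorem gzWalk_mem (rest : List String) :
    ∀ (p : String) (d : Bool) (x : String),
      x ∈ gzWalk rest p d ↔
        ∃ bs : List Bool, bs.length = rest.length ∧ (d = true ∨ false ∈ bs) ∧
          x = gzBuild p rest bs := by
  induction rest with
  | nil =>
      intro p d x
      constructor
      · intro hx
        cases d with
        | false => simp [gzWalk] at hx
        | true =>
            simp [gzWalk] at hx
            exact ⟨[], rfl, Or.inl rfl, by simp [gzBuild, hx]⟩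
      · rintro ⟨bs, hlen, hcond, hx⟩
        have hbs : bs = [] := List.length_eq_zero_iff.mp hlen
        subst hbs
        rcases hcond with h | h
        · subst h; simp [gzWalk, gzBuild] at hx ⊢; exact hx
        · simp at h
  | cons s tail ih =>
      intro p d x
      constructor
      · intro hx
        rcases List.mem_append.mp hx with h | h
        · rcases (ih _ d x).mp h with ⟨bs, hlen, hcond, hx'⟩
          exact ⟨true :: bs, by simp [hlen], by
            rcases hcond with h' | h'
            · exact Or.inl h'
            · exact Or.inr (by simp [h']), by simp [gzBuild, hx']⟩
        · rcases (ih _ true x).mp h with ⟨bs, hlen, _, hx'⟩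
          exact ⟨false :: bs, by simp [hlen], Or.inr (by simp), by simp [gzBuild, hx']⟩
      · rintro ⟨bs, hlen, hcond, hx⟩
        cases bs with
        | nil => simp at hlen
        | cons b bs' =>
            cases b with
            | true =>
                refine List.mem_append.mpr (Or.inl ((ih _ d x).mpr ⟨bs', by simpa using hlen, ?_, by simpa [gzBuild] using hx⟩))
                rcases hcond with h | h
                · exact Or.inl h
                · exact Or.inr (by simpa using h)
            | false =>
                exact List.mem_append.mpr (Or.inr ((ih _ true x).mpr
                  ⟨bs', by simpa using hlen, Or.inl rfl, by simpa [gzBuild] using hx⟩))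

theorem gzBuild_congr (rest : List String) (p : String) (bs bs' : List Bool) (h : bs = bs') :
    gzBuild p rest bs = gzBuild p rest bs' := by rw [h]

theorem gz_foldl_range_build (tl : List String) :
    ∀ (g : Nat → Bool) (p : String),
      (List.range tl.length).foldl
        (fun r i => if g i then r ++ "**/" ++ tl.getD i "" else r ++ tl.getD i "") p
      = gzBuild p tl ((List.range tl.length).map g) := by
  induction tl with
  | nil => intro g p; simp [gzBuild]
  | cons s rest ih =>
      intro g p
      have hr : List.range (rest.length + 1) = 0 :: (List.range rest.length).map Nat.succ :=
        List.range_succ_eq_map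
      simp only [List.length_cons, hr, List.foldl_cons, List.map_cons, List.map_map]
      rw [List.foldl_map]
      have hbody :
          (fun (r : String) (i : Nat) =>
            if g i.succ then r ++ "**/" ++ (s :: rest).getD i.succ "" else r ++ (s :: rest).getD i.succ "")
          = (fun (r : String) (i : Nat) =>
            if (g ∘ Nat.succ) i then r ++ "**/" ++ rest.getD i "" else r ++ rest.getD i "") := by
        funext r i; simp [Function.comp]
      rw [hbody, ih (g ∘ Nat.succ)]
      simp [gzBuild]

theorem gz_and_shift_eq_testBit (m i : Nat) : (m &&& (1 <<< i) != 0) = m.testBit i := by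
  have h1 : (1 : Nat) <<< i = 2 ^ i := by simp [Nat.shiftLeft_eq]
  have h2 : (2 : Nat) ^ i ≠ 0 := (Nat.two_pow_pos i).ne'
  rw [h1, Nat.and_two_pow]
  cases h : m.testBit i
  · simp
  · simp [h2]

theorem gz_testBit_ofBits : ∀ (bs : List Bool) (i : Nat),
    (gzOfBits bs).testBit i = bs.getD i false := by
  intro bs
  induction bs with
  | nil => intro i; simp [gzOfBits]
  | cons b bs' ih =>
      intro i
      cases i with
      | zero =>
          simp only [gzOfBits, Nat.testBit_zero, List.getD_cons_zero]
          cases b <;> simp [Nat.add_mul_mod_self_left]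
      | succ j =>
          simp only [gzOfBits, Nat.testBit_succ, List.getD_cons_succ]
          have : ((cond b 1 0) + 2 * gzOfBits bs') / 2 = gzOfBits bs' := by
            cases b
            · simp
            · simp only [cond_true]
              omega
          rw [this, ih]

theorem gz_ofBits_lt (bs : List Bool) : gzOfBits bs < 2 ^ bs.length := by
  induction bs with
  | nil => simp [gzOfBits]
  | cons b bs' ih =>
      have hb : (cond b 1 0) ≤ 1 := by cases b <;> simp
      simp only [gzOfBits, List.length_cons, pow_succ]
      omega

theorem gz_ofBits_lt_of_false (bs : List Bool) (h : false ∈ bs) :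
    gzOfBits bs < 2 ^ bs.length - 1 := by
  induction bs with
  | nil => simp at h
  | cons b bs' ih =>
      rcases List.mem_cons.mp h with hb | hb
      · have := gz_ofBits_lt bs'
        simp only [gzOfBits, ← hb, List.length_cons, pow_succ]
        simp only [cond_false]
        omega
      · have h1 := ih hb
        have h2 : (1:Nat) ≤ 2 ^ bs'.length := Nat.one_le_two_pow
        have hb1 : (cond b 1 0) ≤ 1 := by cases b <;> simp
        simp only [gzOfBits, List.length_cons, pow_succ]
        omega

theorem gz_bits_ofBits (bs : List Bool) :
    (List.range bs.length).map (gzOfBits bs).testBit = bs := by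
  apply List.ext_getElem
  · simp
  · intro i h1 h2
    simp only [List.getElem_map, List.getElem_range]
    rw [gz_testBit_ofBits]
    exact List.getD_eq_getElem bs false h2

theorem gz_false_mem_bits (m n : Nat) (hm : m < 2 ^ n - 1) :
    false ∈ (List.range n).map m.testBit := by
  by_contra h
  have hall : ∀ i < n, m.testBit i = true := by
    intro i hi
    by_contra hf
    exact h (List.mem_map.mpr ⟨i, List.mem_range.mpr hi, by simpa using (Bool.not_eq_true _).mp hf⟩)
  have hlt : m < 2 ^ n := by omega
  have : m = 2 ^ n - 1 := by
    apply Nat.eq_of_testBit_eq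
    intro i
    rw [Nat.testBit_two_pow_sub_one]
    by_cases hi : i < n
    · simp [hall i hi, hi]
    · have : m < 2 ^ i := lt_of_lt_of_le hlt (Nat.pow_le_pow_right (by omega) (by omega))
      simp [Nat.testBit_lt_two_pow this, hi]
  omega

theorem gz_nodup_foldl_add {α : Type} [BEq α] [LawfulBEq α] (l : List Nat) (f : Nat → α) :
    ∀ (s : PySem.Set α), s.Nodup → (l.foldl (fun v m => PySem.Set.add v (f m)) s).Nodup := by
  induction l with
  | nil => intro s hs; simpa using hs
  | cons a l ih => intro s hs; exact ih _ (PySem.Set.nodup_add _ _ hs)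

theorem gzCore_eq (segments : List String) : gzACore segments = gzBCore segments := by
  unfold gzACore gzBCore
  by_cases hlen : segments.length ≤ 1
  · rw [if_pos hlen, if_pos hlen]
  · rw [if_neg hlen, if_neg hlen]
    obtain ⟨s0, tail, hst⟩ : ∃ s0 tail, segments = s0 :: tail := by
      cases segments with
      | nil => simp at hlen
      | cons a b => exact ⟨a, b, rfl⟩
    subst hst
    simp only [List.length_cons, Nat.add_sub_cancel, List.drop_one, List.tail_cons]
    -- both sides are sorted (with the identity key) of nodup lists: reduce to a permutation
    rw [PySem.List.sorted_id_eq_sorted_id_iff_perm]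
    set n := tail.length with hn
    have h0 : PySem.List.pyGetD (s0 :: tail) 0 "" = s0 := PySem.List.pyGetD_zero_cons _ _ _
    have hA : ∀ x, x ∈ ((List.range ((1 <<< n) - 1)).foldl (fun v mask =>
          PySem.Set.add v ((List.range n).foldl (fun r i =>
            if mask &&& (1 <<< i) != 0 then
              r ++ "**/" ++ PySem.List.pyGetD (s0 :: tail) ((i : Int) + 1) ""
            else
              r ++ PySem.List.pyGetD (s0 :: tail) ((i : Int) + 1) "")
            (PySem.List.pyGetD (s0 :: tail) 0 ""))) PySem.Set.empty) ↔
        ∃ m < 2 ^ n - 1, x = gzBuild s0 tail ((List.range n).map m.testBit) := by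
      intro x
      rw [PySem.Set.mem_foldl_add]
      have hemp : x ∉ (PySem.Set.empty : PySem.Set String) := by simp [PySem.Set.empty]
      have hinner : ∀ m : Nat, ((List.range n).foldl (fun r i =>
            if m &&& (1 <<< i) != 0 then
              r ++ "**/" ++ PySem.List.pyGetD (s0 :: tail) ((i : Int) + 1) ""
            else
              r ++ PySem.List.pyGetD (s0 :: tail) ((i : Int) + 1) "")
            (PySem.List.pyGetD (s0 :: tail) 0 ""))
          = gzBuild s0 tail ((List.range n).map m.testBit) := by
        intro m
        have hidx : ∀ i : Nat, PySem.List.pyGetD (s0 :: tail) ((i : Int) + 1) "" = tail.getD i "" := by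
          intro i
          have hcast : ((i : Int) + 1) = ((i + 1 : Nat) : Int) := by push_cast; ring
          rw [hcast, PySem.List.pyGetD_natCast, List.getD_cons_succ]
        have hbody : (fun (r : String) (i : Nat) =>
              if m &&& (1 <<< i) != 0 then
                r ++ "**/" ++ PySem.List.pyGetD (s0 :: tail) ((i : Int) + 1) ""
              else
                r ++ PySem.List.pyGetD (s0 :: tail) ((i : Int) + 1) "")
            = (fun (r : String) (i : Nat) =>
              if m.testBit i then r ++ "**/" ++ tail.getD i "" else r ++ tail.getD i "") := by
          funext r i
          rw [hidx i, gz_and_shift_eq_testBit]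
        rw [hbody, h0, hn, gz_foldl_range_build tail m.testBit s0]
      constructor
      · rintro (h | ⟨m, hm, hx⟩)
        · exact absurd h hemp
        · rw [hinner m] at hx
          refine ⟨m, ?_, hx⟩
          have := List.mem_range.mp hm
          have h2 : (1 <<< n) = 2 ^ n := by simp [Nat.shiftLeft_eq]
          omega
      · rintro ⟨m, hm, hx⟩
        refine Or.inr ⟨m, List.mem_range.mpr ?_, by rw [hinner m]; exact hx⟩
        have h2 : (1 <<< n) = 2 ^ n := by simp [Nat.shiftLeft_eq]
        omega
    have hB : ∀ x, x ∈ PySem.Set.ofList (gzWalk tail (PySem.List.pyGetD (s0 :: tail) 0 "") false) ↔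
        ∃ bs : List Bool, bs.length = n ∧ false ∈ bs ∧ x = gzBuild s0 tail bs := by
      intro x
      rw [PySem.Set.mem_ofList, h0, gzWalk_mem tail s0 false x]
      constructor
      · rintro ⟨bs, hl, hc, hx⟩
        rcases hc with h | h
        · simp at h
        · exact ⟨bs, by rw [hl], h, hx⟩
      · rintro ⟨bs, hl, hc, hx⟩
        exact ⟨bs, by rw [hl], Or.inr hc, hx⟩
    apply (List.perm_ext_iff_of_nodup ?_ ?_).mpr
    · intro x
      rw [hA x, hB x]
      constructor
      · rintro ⟨m, hm, hx⟩
        exact ⟨(List.range n).map m.testBit, by simp, gz_false_mem_bits m n hm, hx⟩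
      · rintro ⟨bs, hl, hf, hx⟩
        refine ⟨gzOfBits bs, ?_, ?_⟩
        · have := gz_ofBits_lt_of_false bs hf
          rw [hl] at this
          exact this
        · rw [hx]
          apply gzBuild_congr
          rw [← hl, gz_bits_ofBits]
    · exact gz_nodup_foldl_add _ _ PySem.Set.empty (by simp [PySem.Set.empty])
    · exact PySem.Set.nodup_ofList _

-- ===== VERDICT (by name: the statement is the Claim_ definition above) =====
theorem globstar_zero_dir_variants_py_spec : Claim_equal_globstar_zero_dir_variants_py := by
  intro pattern _
  unfold Spec_globstar_zero_dir_variants_py globstar_zero_dir_variants_py globstar_zero_dir_variants_py_alt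
  exact gzCore_eq _
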